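-- pv_equiv track=rewrite | github.com/benmcmorran/anamericanday | process.py | diary_distance
-- ===== SOURCE A (Python) =====
-- def diary_distance(log1, log2):
--     i = 0
--     j = 0
--
--     last_update_time = 0
--     activity_1 = log1[0][1]
--     activity_2 = log2[0][1]
--
--     distance = 0
--
--     while i < len(log1) - 1 or j < len(log2) - 1:
--
--         increment_i = True
--         if i == len(log1) - 1 or (j < len(log2) - 1 and log1[i + 1][0] > log2[j + 1][0]):
--             increment_i = False
--
--         if increment_i:
--             i += 1
--             time = log1[i][0]
--             if activity_1 != activity_2:
--                 distance += time - last_update_time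
--             last_update_time = time
--             activity_1 = log1[i][1]
--         else:
--             j += 1
--             time = log2[j][0]
--             if activity_1 != activity_2:
--                 distance += time - last_update_time
--             last_update_time = time
--             activity_2 = log2[j][1]
--
--     if activity_1 != activity_2:
--         distance += 24 * 60 - last_update_time
--
--     return distance
-- ===== SOURCE B (Python) =====
-- def diary_distance(log1, log2):
--     a1 = log1[0][1]
--     a2 = log2[0][1]
--     # one tagged event stream in the order the diaries interleave (log1 first on ties)
--     xs = [(t, 0, a) for t, a in log1[1:]]
--     ys = [(t, 1, a) for t, a in log2[1:]]
--     events = []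
--     while xs and ys:
--         if ys[0][0] < xs[0][0]:
--             events.append(ys.pop(0))
--         else:
--             events.append(xs.pop(0))
--     events += xs + ys
--     # reconstruct the day as a list of segments (start, end, activity1, activity2)
--     segs = []
--     prev = 0
--     for t, tag, act in events:
--         segs.append((prev, t, a1, a2))
--         prev = t
--         if tag == 0:
--             a1 = act
--         else:
--             a2 = act
--     segs.append((prev, 24 * 60, a1, a2))
--     return sum(e - s for s, e, x, y in segs if x != y)
-- ===== Notes on version B (the rewrite author's own statement) =====
-- stated objective: alternative
-- what changed: B replaces A's single stateful two-index while loop (inline increment_i flag, running distance) by a three-stage pipeline: materialize the interleaved tagged event stream, rebuild the day as an explicit list of (start, end, activity1, activity2) segments, then return a sum comprehension over the segments whose activities differ.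
import Mathlib
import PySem

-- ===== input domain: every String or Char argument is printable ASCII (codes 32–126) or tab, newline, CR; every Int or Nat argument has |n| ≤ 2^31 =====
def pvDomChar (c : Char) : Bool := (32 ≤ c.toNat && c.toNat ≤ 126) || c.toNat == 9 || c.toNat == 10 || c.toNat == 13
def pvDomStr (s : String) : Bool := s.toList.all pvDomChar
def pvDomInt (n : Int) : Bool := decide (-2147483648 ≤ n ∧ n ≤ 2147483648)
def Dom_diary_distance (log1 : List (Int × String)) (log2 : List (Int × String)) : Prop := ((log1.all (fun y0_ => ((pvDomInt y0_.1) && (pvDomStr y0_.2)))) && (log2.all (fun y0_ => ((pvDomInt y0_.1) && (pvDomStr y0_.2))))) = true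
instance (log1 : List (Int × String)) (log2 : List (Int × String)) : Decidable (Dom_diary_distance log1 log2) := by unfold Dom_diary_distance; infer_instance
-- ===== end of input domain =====

-- B replaces A's stateful two-index while loop by a pipeline: materialize the merged tagged event stream, rebuild the day as an explicit segment list, and sum the segments whose activities differ (alternative decomposition, exact same values on non-empty diaries).


-- ===== PORT A =====
-- A's while loop, carried as indices i, j exactly as in the Python; the proof
-- arguments hi, hj only record the in-range invariant A's raise-free runs keep
-- (inside Pre_ every access below is in range, so the getD defaults are dead).
def aLoop (log1 log2 : List (Int × String)) (i j : Nat)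
    (hi : i < log1.length) (hj : j < log2.length)
    (last : Int) (a1 a2 : String) (dist : Int) : Int :=
  if hg : i + 1 < log1.length ∨ j + 1 < log2.length then
    -- increment_i is False iff this condition (same order as Python's test)
    if hc : i + 1 = log1.length ∨ (j + 1 < log2.length ∧ (log1.getD (i+1) (0, "")).1 > (log2.getD (j+1) (0, "")).1) then
      aLoop log1 log2 i (j+1) hi
        (by rcases hc with h | h
            · rcases hg with h2 | h2
              · omega
              · exact h2
            · exact h.1)
        ((log2.getD (j+1) (0, "")).1) a1 ((log2.getD (j+1) (0, "")).2)
        (if a1 ≠ a2 then dist + ((log2.getD (j+1) (0, "")).1 - last) else dist)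
    else
      aLoop log1 log2 (i+1) j
        (by have h1 : i + 1 ≠ log1.length := fun h => hc (Or.inl h); omega) hj
        ((log1.getD (i+1) (0, "")).1) ((log1.getD (i+1) (0, "")).2) a2
        (if a1 ≠ a2 then dist + ((log1.getD (i+1) (0, "")).1 - last) else dist)
  else
    if a1 ≠ a2 then dist + (24 * 60 - last) else dist
termination_by (log1.length - i) + (log2.length - j)
decreasing_by all_goals omega

def diary_distance (log1 : List (Int × String)) (log2 : List (Int × String)) : Int :=
  if h : 0 < log1.length ∧ 0 < log2.length then
    aLoop log1 log2 0 0 h.1 h.2 0 (log1[0]'h.1).2 (log2[0]'h.2).2 0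
  else 0  -- Python raises IndexError at log[0][1] here; excluded by Pre_

-- ===== PORT B =====
-- Source B's while loop merging the two tagged streams head by head (log1 first on ties)
def bMerge : List (Int × Int × String) → List (Int × Int × String) → List (Int × Int × String)
  | x :: xs, y :: ys =>
      if y.1 < x.1 then y :: bMerge (x :: xs) ys else x :: bMerge xs (y :: ys)
  | xs, ys => xs ++ ys
termination_by xs ys => xs.length + ys.length

-- Source B's segment-building loop: (start, end, activity1, activity2) per interval
def bSegs : List (Int × Int × String) → Int → String → String → List (Int × Int × String × String)
  | [], prev, a1, a2 => [(prev, 24 * 60, a1, a2)]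
  | e :: es, prev, a1, a2 =>
      (prev, e.1, a1, a2) ::
        bSegs es e.1 (if e.2.1 = 0 then e.2.2 else a1) (if e.2.1 = 0 then a2 else e.2.2)

def diary_distance_alt (log1 : List (Int × String)) (log2 : List (Int × String)) : Int :=
  match log1, log2 with
  | e1 :: t1, e2 :: t2 =>
      (((bSegs (bMerge (t1.map (fun p => (p.1, (0 : Int), p.2)))
                       (t2.map (fun p => (p.1, (1 : Int), p.2)))) 0 e1.2 e2.2).filter
          (fun s => !(s.2.2.1 == s.2.2.2))).map (fun s => s.2.1 - s.1)).sum
  | _, _ => 0  -- Python raises IndexError here; excluded by Pre_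

-- ===== PRECONDITION & SPEC =====
-- Pre_ excludes exactly the inputs where A raises: an empty diary makes
-- log[0][1] raise IndexError (B raises there too).
def Pre_diary_distance (log1 : List (Int × String)) (log2 : List (Int × String)) : Prop :=
  log1 ≠ [] ∧ log2 ≠ []
instance (log1 : List (Int × String)) (log2 : List (Int × String)) : Decidable (Pre_diary_distance log1 log2) := by unfold Pre_diary_distance; infer_instance

def pvWitness_diary_distance : (List (Int × String)) × (List (Int × String)) :=
  ([(0, "a"), (300, "b")], [(0, "b"), (200, "a")])

def Spec_diary_distance (log1 : List (Int × String)) (log2 : List (Int × String)) (out : Int) : Prop := out = diary_distance_alt log1 log2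
instance (log1 : List (Int × String)) (log2 : List (Int × String)) (out : Int) : Decidable (Spec_diary_distance log1 log2 out) := by unfold Spec_diary_distance; infer_instance

-- ===== CLAIM (what is proved, stated in full; the proofs are below) =====
def Claim_equal_diary_distance : Prop := ∀ (log1 : List (Int × String)) (log2 : List (Int × String)), Dom_diary_distance log1 log2 → Pre_diary_distance log1 log2 → Spec_diary_distance log1 log2 (diary_distance log1 log2)

-- ===== LEMMAS AND PROOFS =====

def tag0 (l : List (Int × String)) : List (Int × Int × String) :=
  l.map (fun p => (p.1, (0 : Int), p.2))
def tag1 (l : List (Int × String)) : List (Int × Int × String) :=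
  l.map (fun p => (p.1, (1 : Int), p.2))

-- one step of A's loop body seen as a fold over the merged event stream
def bStep (s : Int × String × String × Int) (e : Int × Int × String) : Int × String × String × Int :=
  let d := if s.2.1 ≠ s.2.2.1 then s.2.2.2 + (e.1 - s.1) else s.2.2.2
  if e.2.1 = 0 then (e.1, e.2.2, s.2.2.1, d) else (e.1, s.2.1, e.2.2, d)

def bFinish (s : Int × String × String × Int) : Int :=
  if s.2.1 ≠ s.2.2.1 then s.2.2.2 + (24 * 60 - s.1) else s.2.2.2

theorem bMerge_nil_left (ys : List (Int × Int × String)) : bMerge [] ys = ys := by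
  rw [bMerge.eq_def]; rfl

theorem bMerge_nil_right (xs : List (Int × Int × String)) : bMerge xs [] = xs := by
  cases xs with
  | nil => rw [bMerge.eq_def]; rfl
  | cons x xs => rw [bMerge.eq_def]; simp

theorem bMerge_cons_cons (x y : Int × Int × String) (xs ys : List (Int × Int × String)) :
    bMerge (x :: xs) (y :: ys)
      = if y.1 < x.1 then y :: bMerge (x :: xs) ys else x :: bMerge xs (y :: ys) := by
  rw [bMerge.eq_def]

theorem bMerge_take_right (xs : List (Int × Int × String)) (y : Int × Int × String)
    (ys : List (Int × Int × String)) (h : ∀ x, xs.head? = some x → y.1 < x.1) :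
    bMerge xs (y :: ys) = y :: bMerge xs ys := by
  cases xs with
  | nil => rw [bMerge_nil_left, bMerge_nil_left]
  | cons x xs => rw [bMerge_cons_cons, if_pos (h x rfl)]

theorem bMerge_take_left (x : Int × Int × String) (xs ys : List (Int × Int × String))
    (h : ∀ y, ys.head? = some y → ¬ y.1 < x.1) :
    bMerge (x :: xs) ys = x :: bMerge xs ys := by
  cases ys with
  | nil => rw [bMerge_nil_right, bMerge_nil_right]
  | cons y ys => rw [bMerge_cons_cons, if_neg (h y rfl)]

theorem aLoop_eq (n : Nat) : ∀ (log1 log2 : List (Int × String)) (i j : Nat)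
    (hi : i < log1.length) (hj : j < log2.length),
    (log1.length - i) + (log2.length - j) ≤ n →
    ∀ (last : Int) (a1 a2 : String) (dist : Int),
    aLoop log1 log2 i j hi hj last a1 a2 dist
      = bFinish ((bMerge (tag0 (log1.drop (i+1))) (tag1 (log2.drop (j+1)))).foldl
          bStep (last, a1, a2, dist)) := by
  induction n with
  | zero => intro log1 log2 i j hi hj hn; omega
  | succ n ih =>
      intro log1 log2 i j hi hj hn last a1 a2 dist
      by_cases hg : i + 1 < log1.length ∨ j + 1 < log2.length
      · by_cases hc : i + 1 = log1.length ∨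
            (j + 1 < log2.length ∧ (log1.getD (i+1) (0, "")).1 > (log2.getD (j+1) (0, "")).1)
        · -- A advances j
          have hj2 : j + 1 < log2.length := by
            rcases hc with h | h
            · rcases hg with h2 | h2 <;> omega
            · exact h.1
          rw [aLoop.eq_def]; rw [dif_pos hg, dif_pos hc]
          rw [ih log1 log2 i (j+1) hi hj2 (by omega)]
          rw [List.drop_eq_getElem_cons hj2]
          rw [show tag1 (log2[j+1] :: log2.drop (j+1+1))
              = (log2[j+1].1, (1:Int), log2[j+1].2) :: tag1 (log2.drop (j+1+1)) from rfl]
          rw [bMerge_take_right _ _ _ ?hhd]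
          case hhd =>
            intro x hx
            have hi2 : i + 1 < log1.length := by
              by_contra hle
              rw [List.drop_eq_nil_of_le (by omega)] at hx
              simp [tag0] at hx
            rw [List.drop_eq_getElem_cons hi2] at hx
            rw [show tag0 (log1[i+1] :: log1.drop (i+1+1))
                = (log1[i+1].1, (0:Int), log1[i+1].2) :: tag0 (log1.drop (i+1+1)) from rfl] at hx
            simp only [List.head?_cons, Option.some.injEq] at hx
            subst hx
            rcases hc with h | h
            · omega
            · have hgt := h.2
              rw [List.getD_eq_getElem _ _ hi2, List.getD_eq_getElem _ _ hj2] at hgt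
              exact hgt
          rw [List.foldl_cons]
          rw [show bStep (last, a1, a2, dist) (log2[j+1].1, (1:Int), log2[j+1].2)
              = (log2[j+1].1, a1, log2[j+1].2,
                  if a1 ≠ a2 then dist + (log2[j+1].1 - last) else dist) from by simp [bStep]]
          rw [List.getD_eq_getElem _ _ hj2]
        · -- A advances i
          have hi2 : i + 1 < log1.length := by
            have h1 : i + 1 ≠ log1.length := fun h => hc (Or.inl h); omega
          rw [aLoop.eq_def]; rw [dif_pos hg, dif_neg hc]
          rw [ih log1 log2 (i+1) j hi2 hj (by omega)]
          rw [List.drop_eq_getElem_cons hi2]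
          rw [show tag0 (log1[i+1] :: log1.drop (i+1+1))
              = (log1[i+1].1, (0:Int), log1[i+1].2) :: tag0 (log1.drop (i+1+1)) from rfl]
          rw [bMerge_take_left _ _ _ ?hhd]
          case hhd =>
            intro y hy
            have hj2 : j + 1 < log2.length := by
              by_contra hle
              rw [List.drop_eq_nil_of_le (by omega)] at hy
              simp [tag1] at hy
            rw [List.drop_eq_getElem_cons hj2] at hy
            rw [show tag1 (log2[j+1] :: log2.drop (j+1+1))
                = (log2[j+1].1, (1:Int), log2[j+1].2) :: tag1 (log2.drop (j+1+1)) from rfl] at hy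
            simp only [List.head?_cons, Option.some.injEq] at hy
            subst hy
            have hngt : ¬ (log1.getD (i+1) (0, "")).1 > (log2.getD (j+1) (0, "")).1 :=
              fun h => hc (Or.inr ⟨hj2, h⟩)
            rw [List.getD_eq_getElem _ _ hi2, List.getD_eq_getElem _ _ hj2] at hngt
            exact hngt
          rw [List.foldl_cons]
          rw [show bStep (last, a1, a2, dist) (log1[i+1].1, (0:Int), log1[i+1].2)
              = (log1[i+1].1, log1[i+1].2, a2,
                  if a1 ≠ a2 then dist + (log1[i+1].1 - last) else dist) from by simp [bStep]]
          rw [List.getD_eq_getElem _ _ hi2]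
      · -- loop ends
        rw [aLoop.eq_def]; rw [dif_neg hg]
        push Not at hg
        rw [List.drop_eq_nil_of_le hg.1, List.drop_eq_nil_of_le hg.2]
        simp [tag0, tag1, bMerge_nil_left, bFinish]

-- B's segment list sums to the folded running distance plus the final add
theorem segs_sum : ∀ (events : List (Int × Int × String)) (prev : Int) (a1 a2 : String) (dist : Int),
    dist + (((bSegs events prev a1 a2).filter
        (fun s => !(s.2.2.1 == s.2.2.2))).map (fun s => s.2.1 - s.1)).sum
      = bFinish (events.foldl bStep (prev, a1, a2, dist)) := by
  intro events
  induction events with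
  | nil =>
      intro prev a1 a2 dist
      by_cases h : a1 = a2 <;> simp [bSegs, bFinish, h]
  | cons e es ih =>
      intro prev a1 a2 dist
      rw [show bSegs (e :: es) prev a1 a2
          = (prev, e.1, a1, a2) ::
              bSegs es e.1 (if e.2.1 = 0 then e.2.2 else a1)
                (if e.2.1 = 0 then a2 else e.2.2) from rfl]
      rw [List.foldl_cons]
      rw [show bStep (prev, a1, a2, dist) e
          = (e.1, (if e.2.1 = 0 then e.2.2 else a1), (if e.2.1 = 0 then a2 else e.2.2),
              if a1 ≠ a2 then dist + (e.1 - prev) else dist) from by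
        by_cases h0 : e.2.1 = 0 <;> simp [bStep, h0]]
      rw [← ih]
      by_cases h : a1 = a2 <;> simp [h] <;> omega

-- ===== VERDICT (by name: the statement is the Claim_ definition above) =====
theorem diary_distance_spec : Claim_equal_diary_distance := by
  intro log1 log2 _ hpre
  obtain ⟨hne1, hne2⟩ := hpre
  obtain ⟨e1, t1, rfl⟩ := List.exists_cons_of_ne_nil hne1
  obtain ⟨e2, t2, rfl⟩ := List.exists_cons_of_ne_nil hne2
  unfold Spec_diary_distance diary_distance
  have hlen : 0 < (e1 :: t1).length ∧ 0 < (e2 :: t2).length := by simp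
  rw [dif_pos hlen]
  rw [aLoop_eq ((e1 :: t1).length + (e2 :: t2).length) _ _ 0 0 hlen.1 hlen.2 (by omega)]
  have hd1 : (e1 :: t1).drop (0+1) = t1 := by simp
  have hd2 : (e2 :: t2).drop (0+1) = t2 := by simp
  rw [hd1, hd2, ← segs_sum]
  simp [diary_distance_alt, tag0, tag1]
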